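-- pv_equiv track=rewrite | github.com/ziya-ai/ziya | app/utils/streaming_optimizer.py | is_in_code_block
-- ===== SOURCE A (Python) =====
-- def is_in_code_block(accumulated_text: str) -> tuple[bool, str]:
--     """
--     Check if the accumulated text ends in the middle of a code block.
--
--     Returns:
--         (is_in_block, block_type): True if in block, with block type
--     """
--     lines = accumulated_text.split('\n')
--     open_blocks = []
--
--     for line in lines:
--         stripped = line.strip()
--         if stripped.startswith('```'):
--             if stripped == '```':
--                 # Closing block
--                 if open_blocks:
--                     open_blocks.pop()
--             else:
--                 # Opening block
--                 block_type = stripped[3:].strip() or 'text'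
--                 open_blocks.append(block_type)
--
--     if open_blocks:
--         return True, open_blocks[-1]  # Return the most recent open block type
--     return False, None
-- ===== SOURCE B (Python) =====
-- def is_in_code_block(accumulated_text: str) -> tuple[bool, str]:
--     # Reverse scan with a pending-closes counter instead of a forward stack:
--     # the first opener from the end not cancelled by a later bare ``` is the
--     # innermost open block; returns early there.
--     pending = 0
--     for line in reversed(accumulated_text.split('\n')):
--         stripped = line.strip()
--         if stripped.startswith('```'):
--             if stripped == '```':
--                 pending += 1
--             elif pending > 0:
--                 pending -= 1
--             else:
--                 return True, stripped[3:].strip() or 'text'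
--     return False, None
-- ===== Notes on version B (the rewrite author's own statement) =====
-- stated objective: alternative
-- what changed: Replaces the forward pass that builds and pops a stack of open block types with a single reverse scan keeping only an integer pending-closes counter, returning early at the first unmatched opener from the end.
import Mathlib
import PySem

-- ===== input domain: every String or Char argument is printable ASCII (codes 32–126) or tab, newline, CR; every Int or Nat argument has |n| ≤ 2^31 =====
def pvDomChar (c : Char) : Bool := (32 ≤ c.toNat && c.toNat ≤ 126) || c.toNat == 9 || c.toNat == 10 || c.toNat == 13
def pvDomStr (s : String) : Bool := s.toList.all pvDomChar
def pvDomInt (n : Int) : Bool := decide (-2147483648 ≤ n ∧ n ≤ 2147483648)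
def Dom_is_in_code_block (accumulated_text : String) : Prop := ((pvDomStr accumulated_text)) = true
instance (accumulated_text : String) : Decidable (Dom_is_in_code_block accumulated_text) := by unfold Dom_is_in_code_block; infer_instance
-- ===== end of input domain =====

set_option maxHeartbeats 1000000


-- B replaces A's forward stack of open block types with a reverse scan keeping
-- only a pending-closes counter and an early return (alternative decomposition,
-- same asymptotic cost).

-- ===== PORT A =====
-- one iteration of A's forward loop over the lines, updating the open_blocks stack
def pvA_step (open_blocks : List String) (line : String) : List String :=
  let stripped := PySem.Str.strip line
  if PySem.Str.startswith stripped "```" then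
    if stripped = "```" then
      -- closing block: pop if nonempty
      open_blocks.dropLast
    else
      -- opening block
      let block_type :=
        if PySem.Str.strip (PySem.Str.slice stripped (some 3) none) = "" then "text"
        else PySem.Str.strip (PySem.Str.slice stripped (some 3) none)
      open_blocks ++ [block_type]
  else open_blocks

def is_in_code_block (accumulated_text : String) : Bool × Option String :=
  let lines := (PySem.Str.split? accumulated_text "\n").getD []   -- sep ≠ "", always some
  let open_blocks := lines.foldl pvA_step []
  match open_blocks.getLast? with     -- `if open_blocks: return True, open_blocks[-1]`
  | some bt => (true, some bt)
  | none => (false, none)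

-- ===== PORT B =====
-- B's reverse loop: `pending` counts later bare ``` closers not yet matched
def pvB_loop : List String → Nat → Bool × Option String
  | [], _ => (false, none)
  | line :: rest, pending =>
    let stripped := PySem.Str.strip line
    if PySem.Str.startswith stripped "```" then
      if stripped = "```" then pvB_loop rest (pending + 1)
      else if 0 < pending then pvB_loop rest (pending - 1)
      else
        let bt := PySem.Str.strip (PySem.Str.slice stripped (some 3) none)
        (true, some (if bt = "" then "text" else bt))
    else pvB_loop rest pending

def is_in_code_block_alt (accumulated_text : String) : Bool × Option String :=
  pvB_loop ((PySem.Str.split? accumulated_text "\n").getD []).reverse 0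

-- ===== PRECONDITION & SPEC =====
def Spec_is_in_code_block (accumulated_text : String) (out : Bool × Option String) : Prop := out = is_in_code_block_alt accumulated_text
instance (accumulated_text : String) (out : Bool × Option String) : Decidable (Spec_is_in_code_block accumulated_text out) := by unfold Spec_is_in_code_block; infer_instance

-- ===== CLAIM (what is proved, stated in full; the proofs are below) =====
def Claim_equal_is_in_code_block : Prop := ∀ (accumulated_text : String), Dom_is_in_code_block accumulated_text → Spec_is_in_code_block accumulated_text (is_in_code_block accumulated_text)

-- ===== LEMMAS AND PROOFS =====

-- B's reverse loop with `k` pending closes answers exactly what A's stack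
-- (built forward from the same lines) says `k` levels below its top.
theorem pvB_loop_eq_stack (r : List String) : ∀ (k : Nat),
    pvB_loop r k =
      if k < (r.reverse.foldl pvA_step []).length then
        (true, (r.reverse.foldl pvA_step [])[(r.reverse.foldl pvA_step []).length - 1 - k]?)
      else (false, none) := by
  induction r with
  | nil => intro k; simp [pvB_loop]
  | cons line rest ih =>
    intro k
    have hs : (line :: rest).reverse.foldl pvA_step [] =
        pvA_step (rest.reverse.foldl pvA_step []) line := by
      simp [List.foldl_append]
    rw [hs]
    set s' := rest.reverse.foldl pvA_step [] with hs'
    clear_value s'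
    rw [pvB_loop]
    simp only [pvA_step]
    by_cases hfence : PySem.Str.startswith (PySem.Str.strip line) "```" = true
    · rw [if_pos hfence, if_pos hfence]
      by_cases hbare : PySem.Str.strip line = "```"
      · -- bare ``` : A pops (dropLast), B counts one more pending close
        rw [if_pos hbare, if_pos hbare, ih (k + 1)]
        have hd : s'.dropLast.length = s'.length - 1 := List.length_dropLast
        by_cases hlt : k + 1 < s'.length
        · rw [if_pos hlt, if_pos (by omega : k < s'.dropLast.length)]
          have hi : s'.dropLast.length - 1 - k < s'.dropLast.length := by omega
          have hi' : s'.dropLast.length - 1 - k < s'.length - 1 := by omega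
          have he : s'.length - 1 - (k + 1) = s'.dropLast.length - 1 - k := by omega
          rw [he]
          congr 1
          rw [List.getElem?_eq_getElem hi, List.getElem?_eq_getElem (by omega)]
          congr 1
          exact (List.getElem_dropLast hi).symm
        · rw [if_neg hlt, if_neg (by omega : ¬ k < s'.dropLast.length)]
      · -- opener line: A pushes the block type, B consumes a pending close or returns
        rw [if_neg hbare, if_neg hbare]
        set bt := PySem.Str.strip (PySem.Str.slice (PySem.Str.strip line) (some 3) none) with hbt
        clear_value bt
        set btv := (if bt = "" then "text" else bt) with hbtv
        clear_value btv
        have hl : (s' ++ [btv]).length = s'.length + 1 := by simp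
        by_cases hk : 0 < k
        · rw [if_pos hk, ih (k - 1)]
          by_cases hlt : k - 1 < s'.length
          · rw [if_pos hlt, if_pos (show k < (s' ++ [btv]).length by omega), hl]
            have he : s'.length + 1 - 1 - k = s'.length - 1 - (k - 1) := by omega
            rw [he]
            congr 1
            exact (List.getElem?_append_left (by omega)).symm
          · rw [if_neg hlt, if_neg (show ¬ k < (s' ++ [btv]).length by rw [hl]; omega)]
        · have hk0 : k = 0 := by omega
          subst hk0
          rw [if_neg hk, if_pos (show 0 < (s' ++ [btv]).length by rw [hl]; omega), hl]
          congr 1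
          rw [List.getElem?_append_right (by omega)]
          simp
    · rw [if_neg hfence, if_neg hfence, ih k]

theorem is_in_code_block_spec : Claim_equal_is_in_code_block := by
  intro t _
  unfold Spec_is_in_code_block is_in_code_block is_in_code_block_alt
  rw [pvB_loop_eq_stack]
  simp only [List.reverse_reverse]
  cases hsl : (((PySem.Str.split? t "\n").getD []).foldl pvA_step []).getLast? with
  | some bt =>
    have hne : ((PySem.Str.split? t "\n").getD []).foldl pvA_step [] ≠ [] := by
      intro h; rw [h] at hsl; simp at hsl
    have hlen := List.length_pos_of_ne_nil hne
    rw [if_pos (by omega)]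
    rw [Nat.sub_zero, ← List.getLast?_eq_getElem?, hsl]
  | none =>
    have h0 : ((PySem.Str.split? t "\n").getD []).foldl pvA_step [] = [] :=
      List.getLast?_eq_none_iff.mp hsl
    rw [if_neg (by rw [h0]; simp)]
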